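-- pv_equiv track=rewrite | github.com/kristalik182/laba-2.4-2.5 | laba 2.5/2.py | analyze_numbers
-- ===== SOURCE A (Python) =====
-- def analyze_numbers(numbers):
--     positive_sum = sum(num for num in numbers if num > 0)
--     min_value = min(numbers)
--     max_value = max(numbers)
--     min_index = numbers.index(min_value)
--     max_index = numbers.index(max_value)
--     start_index = min(min_index, max_index)
--     end_index = max(min_index, max_index)
--     product = 1
--     for num in numbers[start_index + 1:end_index]:
--         product *= num
--     return positive_sum, product
-- ===== SOURCE B (Python) =====
-- def analyze_numbers(numbers):
--     if not numbers:
--         raise ValueError("min() arg is an empty sequence")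
--
--     def scan(lo, hi):
--         # summary of numbers[lo:hi] (nonempty):
--         # (positive_sum, min_value, first_min_index, max_value, first_max_index)
--         if hi - lo == 1:
--             v = numbers[lo]
--             return (v if v > 0 else 0, v, lo, v, lo)
--         mid = (lo + hi) // 2
--         ls, ln, li, lx, lj = scan(lo, mid)
--         rs, rn, ri, rx, rj = scan(mid, hi)
--         return (ls + rs,
--                 ln if ln <= rn else rn,
--                 li if ln <= rn else ri,
--                 lx if lx >= rx else rx,
--                 lj if lx >= rx else rj)
--
--     positive_sum, _, min_index, _, max_index = scan(0, len(numbers))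
--     start_index, end_index = ((min_index, max_index) if min_index <= max_index
--                               else (max_index, min_index))
--     product = 1
--     for num in numbers[start_index + 1:end_index]:
--         product *= num
--     return positive_sum, product
-- ===== Notes on version B (the rewrite author's own statement) =====
-- stated objective: alternative
-- what changed: B replaces A's five linear scans (sum, min, max, two list.index passes) by a divide-and-conquer recursion that splits the index range in half and merges (positive_sum, min value+first index, max value+first index) summaries, then runs the one product pass over the slice.
-- outside the precondition, e.g. on analyze_numbers([]): A raises ValueError, B raises ValueError
import Mathlib
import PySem

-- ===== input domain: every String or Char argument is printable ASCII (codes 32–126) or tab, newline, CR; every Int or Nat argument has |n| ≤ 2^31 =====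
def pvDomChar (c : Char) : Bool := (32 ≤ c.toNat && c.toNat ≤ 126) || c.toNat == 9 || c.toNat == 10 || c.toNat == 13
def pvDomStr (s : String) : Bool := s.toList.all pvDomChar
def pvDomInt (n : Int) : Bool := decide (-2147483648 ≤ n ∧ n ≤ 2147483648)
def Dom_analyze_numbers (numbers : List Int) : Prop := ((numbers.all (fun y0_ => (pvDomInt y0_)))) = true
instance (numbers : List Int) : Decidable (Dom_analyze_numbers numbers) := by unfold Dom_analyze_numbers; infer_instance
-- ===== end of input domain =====

-- B computes the positive sum and the first min/max indices by a divide-and-conquer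
-- recursion over index ranges instead of A's five linear scans (alternative algorithm,
-- same result; on the empty list both Pythons raise ValueError, excluded by Pre_).


-- ===== PORT A =====
def analyze_numbers (numbers : List Int) : Int × Int :=
  let positive_sum := (numbers.filter (fun num => decide (num > 0))).sum
  let min_value := (PySem.List.min? numbers (fun x => x)).getD 0
  let max_value := (PySem.List.max? numbers (fun x => x)).getD 0
  let min_index : Int := ((PySem.List.index? numbers min_value).getD 0 : Nat)
  let max_index : Int := ((PySem.List.index? numbers max_value).getD 0 : Nat)
  let start_index := min min_index max_index
  let end_index := max min_index max_index
  let product := (PySem.List.slice numbers (some (start_index + 1)) (some end_index)).foldl (· * ·) 1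
  (positive_sum, product)

-- ===== PORT B =====
-- B's recursive helper 'scan(lo, hi)': summary of numbers[lo:hi] as
-- (positive_sum, min value, first min index, max value, first max index).
-- The '≤ 1' guard (Python tests '== 1') only makes the recursion total on
-- degenerate ranges B never calls; numbers[lo] is pyGet? with a default, total.
def scanDC (numbers : List Int) (lo hi : Int) : Int × Int × Int × Int × Int :=
  if _hle : hi - lo ≤ 1 then
    let v := (PySem.List.pyGet? numbers lo).getD 0
    ((if v > 0 then v else 0), v, lo, v, lo)
  else
    let mid := PySem.Int.floordiv (lo + hi) 2
    let L := scanDC numbers lo mid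
    let R := scanDC numbers mid hi
    (L.1 + R.1,
     (if L.2.1 ≤ R.2.1 then L.2.1 else R.2.1),
     (if L.2.1 ≤ R.2.1 then L.2.2.1 else R.2.2.1),
     (if L.2.2.2.1 ≥ R.2.2.2.1 then L.2.2.2.1 else R.2.2.2.1),
     (if L.2.2.2.1 ≥ R.2.2.2.1 then L.2.2.2.2 else R.2.2.2.2))
termination_by (hi - lo).toNat
decreasing_by
  · have hm1 : lo + 1 ≤ PySem.Int.floordiv (lo + hi) 2 :=
      (PySem.Int.le_floordiv_iff_mul_le (by norm_num)).mpr (by omega)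
    have hm2 : PySem.Int.floordiv (lo + hi) 2 < hi :=
      (PySem.Int.floordiv_lt_iff_lt_mul (by norm_num)).mpr (by omega)
    omega
  · have hm1 : lo + 1 ≤ PySem.Int.floordiv (lo + hi) 2 :=
      (PySem.Int.le_floordiv_iff_mul_le (by norm_num)).mpr (by omega)
    have hm2 : PySem.Int.floordiv (lo + hi) 2 < hi :=
      (PySem.Int.floordiv_lt_iff_lt_mul (by norm_num)).mpr (by omega)
    omega

def analyze_numbers_alt (numbers : List Int) : Int × Int :=
  match numbers with
  | [] => (0, 0)   -- unreachable under Pre_: Python B raises ValueError here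
  | _ :: _ =>
    match scanDC numbers 0 (numbers.length : Int) with
    | (positive_sum, _, min_index, _, max_index) =>
      let start_index := if min_index ≤ max_index then min_index else max_index
      let end_index := if min_index ≤ max_index then max_index else min_index
      let product := (PySem.List.slice numbers (some (start_index + 1)) (some end_index)).foldl (· * ·) 1
      (positive_sum, product)

-- ===== PRECONDITION & SPEC =====
-- Pre_ excludes only the empty list, on which min([]) makes A raise ValueError (B raises too).
def Pre_analyze_numbers (numbers : List Int) : Prop := numbers ≠ []
instance (numbers : List Int) : Decidable (Pre_analyze_numbers numbers) := by unfold Pre_analyze_numbers; infer_instance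
def pvWitness_analyze_numbers : List Int := [3, -2, 5, 1]
def Spec_analyze_numbers (numbers : List Int) (out : Int × Int) : Prop := out = analyze_numbers_alt numbers
instance (numbers : List Int) (out : Int × Int) : Decidable (Spec_analyze_numbers numbers out) := by unfold Spec_analyze_numbers; infer_instance

-- ===== CLAIM (what is proved, stated in full; the proofs are below) =====
def Claim_equal_analyze_numbers : Prop := ∀ (numbers : List Int), Dom_analyze_numbers numbers → Pre_analyze_numbers numbers → Spec_analyze_numbers numbers (analyze_numbers numbers)

-- ===== LEMMAS AND PROOFS =====

-- spec values of a (nonempty) segment p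
def psum (p : List Int) : Int := (p.filter (fun num => decide (num > 0))).sum
def mval (p : List Int) : Int := match p with | [] => 0 | h :: t => t.foldl min h
def xval (p : List Int) : Int := match p with | [] => 0 | h :: t => t.foldl max h
def midx (p : List Int) : Int := ((PySem.List.index? p (mval p)).getD 0 : Nat)
def xidx (p : List Int) : Int := ((PySem.List.index? p (xval p)).getD 0 : Nat)
def seg (numbers : List Int) (lo hi : Int) : List Int :=
  (numbers.drop lo.toNat).take (hi - lo).toNat

theorem psum_append (s1 s2 : List Int) : psum (s1 ++ s2) = psum s1 + psum s2 := by
  simp [psum, List.filter_append]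

theorem mval_le_mem (h : Int) (t : List Int) : ∀ y ∈ h :: t, mval (h :: t) ≤ y := by
  intro y hy
  rcases List.mem_cons.mp hy with rfl | hy
  · exact (PySem.List.foldl_min_le t y).1
  · exact (PySem.List.foldl_min_le t h).2 y hy

theorem mem_le_xval (h : Int) (t : List Int) : ∀ y ∈ h :: t, y ≤ xval (h :: t) := by
  intro y hy
  rcases List.mem_cons.mp hy with rfl | hy
  · exact (PySem.List.le_foldl_max t y).1
  · exact (PySem.List.le_foldl_max t h).2 y hy

theorem mval_mem (h : Int) (t : List Int) : mval (h :: t) ∈ h :: t := by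
  rcases PySem.List.foldl_min_mem t h with heq | hmem
  · rw [mval]; rw [heq]; exact List.mem_cons_self
  · exact List.mem_cons_of_mem h hmem

theorem xval_mem (h : Int) (t : List Int) : xval (h :: t) ∈ h :: t := by
  rcases PySem.List.foldl_max_mem t h with heq | hmem
  · rw [xval]; rw [heq]; exact List.mem_cons_self
  · exact List.mem_cons_of_mem h hmem

theorem mval_append (h1 h2 : Int) (t1 t2 : List Int) :
    mval ((h1 :: t1) ++ (h2 :: t2)) = min (mval (h1 :: t1)) (mval (h2 :: t2)) := by
  simp only [mval, List.cons_append, List.foldl_append, List.foldl_cons]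
  exact List.foldl_assoc

theorem xval_append (h1 h2 : Int) (t1 t2 : List Int) :
    xval ((h1 :: t1) ++ (h2 :: t2)) = max (xval (h1 :: t1)) (xval (h2 :: t2)) := by
  simp only [xval, List.cons_append, List.foldl_append, List.foldl_cons]
  exact List.foldl_assoc

-- index of a value of the second part, absent from the first, in an append
theorem index?_append_shift (s1 s2 : List Int) (v : Int) (hn : v ∉ s1) (hm : v ∈ s2) :
    PySem.List.index? (s1 ++ s2) v =
      (PySem.List.index? s2 v).map (fun k => s1.length + k) := by
  rcases e : PySem.List.index? s2 v with _ | k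
  · exact absurd hm ((PySem.List.index?_eq_none_iff s2 v).mp e)
  · obtain ⟨pre, suf, hsp, hlen, hpre⟩ := (PySem.List.index?_eq_some_iff s2 v k).mp e
    have : PySem.List.index? (s1 ++ s2) v = some (s1.length + k) := by
      refine (PySem.List.index?_eq_some_iff _ v _).mpr ⟨s1 ++ pre, suf, ?_, ?_, ?_⟩
      · rw [hsp, List.append_assoc]
      · simp [hlen]
      · simp only [List.mem_append]
        rintro (h | h)
        · exact hn h
        · exact hpre h
    rw [this]
    rfl

theorem midx_append (h1 h2 : Int) (t1 t2 : List Int) :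
    midx ((h1 :: t1) ++ (h2 :: t2)) =
      if mval (h1 :: t1) ≤ mval (h2 :: t2) then midx (h1 :: t1)
      else ((h1 :: t1).length : Int) + midx (h2 :: t2) := by
  unfold midx
  rw [mval_append]
  split
  · rename_i hle
    rw [min_eq_left hle, PySem.List.index?_append_of_mem (h2 :: t2) (mval_mem h1 t1)]
  · rename_i hgt
    have hlt : mval (h2 :: t2) < mval (h1 :: t1) := not_le.mp hgt
    rw [min_eq_right hlt.le]
    have hn : mval (h2 :: t2) ∉ h1 :: t1 := fun hmem =>
      absurd (mval_le_mem h1 t1 _ hmem) (not_le.mpr hlt)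
    rw [index?_append_shift _ _ _ hn (mval_mem h2 t2)]
    rcases e : PySem.List.index? (h2 :: t2) (mval (h2 :: t2)) with _ | k
    · exact absurd (mval_mem h2 t2) ((PySem.List.index?_eq_none_iff _ _).mp e)
    · simp

theorem xidx_append (h1 h2 : Int) (t1 t2 : List Int) :
    xidx ((h1 :: t1) ++ (h2 :: t2)) =
      if xval (h1 :: t1) ≥ xval (h2 :: t2) then xidx (h1 :: t1)
      else ((h1 :: t1).length : Int) + xidx (h2 :: t2) := by
  unfold xidx
  rw [xval_append]
  split
  · rename_i hge
    rw [max_eq_left hge, PySem.List.index?_append_of_mem (h2 :: t2) (xval_mem h1 t1)]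
  · rename_i hgt
    have hlt : xval (h1 :: t1) < xval (h2 :: t2) := not_le.mp hgt
    rw [max_eq_right hlt.le]
    have hn : xval (h2 :: t2) ∉ h1 :: t1 := fun hmem =>
      absurd (mem_le_xval h1 t1 _ hmem) (not_le.mpr hlt)
    rw [index?_append_shift _ _ _ hn (xval_mem h2 t2)]
    rcases e : PySem.List.index? (h2 :: t2) (xval (h2 :: t2)) with _ | k
    · exact absurd (xval_mem h2 t2) ((PySem.List.index?_eq_none_iff _ _).mp e)
    · simp

theorem scan_spec (numbers : List Int) : ∀ (n : Nat) (lo hi : Int),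
    (hi - lo).toNat = n → 0 ≤ lo → lo < hi → hi ≤ (numbers.length : Int) →
    scanDC numbers lo hi =
      (psum (seg numbers lo hi), mval (seg numbers lo hi), lo + midx (seg numbers lo hi),
       xval (seg numbers lo hi), lo + xidx (seg numbers lo hi)) := by
  intro n
  induction n using Nat.strong_induction_on with
  | _ n ih =>
    intro lo hi hn hlo hlt hhi
    rw [scanDC]
    by_cases hle : hi - lo ≤ 1
    · -- base: hi = lo + 1, the segment is the single element numbers[lo]
      have hhi1 : hi = lo + 1 := by omega
      have hlt' : lo.toNat < numbers.length := by omega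
      have hseg : seg numbers lo hi = [numbers[lo.toNat]] := by
        rw [seg, hhi1]
        have h1 : (lo + 1 - lo).toNat = 1 := by omega
        rw [h1, List.drop_eq_getElem_cons hlt', List.take_succ_cons, List.take_zero]
      have hget : (PySem.List.pyGet? numbers lo).getD 0 = numbers[lo.toNat] := by
        have hl : lo < (numbers.length : Int) := by omega
        simp [PySem.List.pyGet?, PySem.List.pyIdx?, hlo, hl, hlt']
      simp only [dif_pos hle]
      rw [hseg, hget]
      simp only [psum, mval, xval, midx, xidx, PySem.List.index?_cons_self,
        List.foldl_nil, Option.getD_some, Nat.cast_zero, add_zero, Prod.mk.injEq]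
      refine ⟨?_, trivial⟩
      split_ifs with h <;> simp [List.filter, h]
    · -- step: split at mid and merge the two summaries
      have h2 : lo + 2 ≤ hi := by omega
      simp only [dif_neg hle]
      set mid := PySem.Int.floordiv (lo + hi) 2 with hmid
      have hm1 : lo + 1 ≤ mid :=
        (PySem.Int.le_floordiv_iff_mul_le (by norm_num)).mpr (by omega)
      have hm2 : mid < hi :=
        (PySem.Int.floordiv_lt_iff_lt_mul (by norm_num)).mpr (by omega)
      have ihL := ih (mid - lo).toNat (by omega) lo mid rfl hlo (by omega) (by omega)
      have ihR := ih (hi - mid).toNat (by omega) mid hi rfl (by omega) hm2 hhi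
      have hsplit : seg numbers lo hi = seg numbers lo mid ++ seg numbers mid hi := by
        rw [seg, seg, seg]
        have hadd : (hi - lo).toNat = (mid - lo).toNat + (hi - mid).toNat := by omega
        rw [hadd, List.take_add, List.drop_drop]
        have harg : lo.toNat + (mid - lo).toNat = mid.toNat := by omega
        rw [harg]
      have hlenL : (seg numbers lo mid).length = (mid - lo).toNat := by
        rw [seg]
        simp only [List.length_take, List.length_drop]
        omega
      have hlenR : (seg numbers mid hi).length = (hi - mid).toNat := by
        rw [seg]
        simp only [List.length_take, List.length_drop]
        omega
      obtain ⟨c1, r1, hc1⟩ : ∃ c r, seg numbers lo mid = c :: r := by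
        cases hL : seg numbers lo mid with
        | nil => rw [hL] at hlenL; simp at hlenL; omega
        | cons c r => exact ⟨c, r, rfl⟩
      obtain ⟨c2, r2, hc2⟩ : ∃ c r, seg numbers mid hi = c :: r := by
        cases hR : seg numbers mid hi with
        | nil => rw [hR] at hlenR; simp at hlenR; omega
        | cons c r => exact ⟨c, r, rfl⟩
      have hcastL : ((c1 :: r1).length : Int) = mid - lo := by
        rw [← hc1, hlenL]; omega
      rw [ihL, ihR, hsplit, hc1, hc2]
      simp only [psum_append, mval_append, xval_append, midx_append, xidx_append]
      simp only [Prod.mk.injEq]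
      refine ⟨trivial, ?_, ?_, ?_, ?_⟩
      · rw [min_def]
      · split
        · rfl
        · rw [hcastL]; ring
      · by_cases hd : xval (c1 :: r1) ≥ xval (c2 :: r2)
        · rw [if_pos hd, max_eq_left hd]
        · rw [if_neg hd, max_eq_right (le_of_not_ge hd)]
      · split
        · rfl
        · rw [hcastL]; ring
-- ===== VERDICT (by name: the statement is the Claim_ definition above) =====
theorem analyze_numbers_spec : Claim_equal_analyze_numbers := by
  intro numbers _hdom hpre
  unfold Spec_analyze_numbers
  obtain ⟨h, t, rfl⟩ : ∃ h t, numbers = h :: t := by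
    cases numbers with | nil => exact absurd rfl hpre | cons h t => exact ⟨h, t, rfl⟩
  have hlen0 : (0:Int) < ((h :: t).length : Int) := by simp
  have hs := scan_spec (h :: t) ((((h :: t).length : Int) - 0).toNat) 0
    ((h :: t).length : Int) rfl le_rfl hlen0 le_rfl
  have hseg : seg (h :: t) 0 ((h :: t).length : Int) = h :: t := by
    rw [seg]; simp
  rw [hseg] at hs
  simp only [zero_add] at hs
  have hB : analyze_numbers_alt (h :: t) =
      (psum (h :: t),
        (PySem.List.slice (h :: t)
          (some ((if midx (h :: t) ≤ xidx (h :: t) then midx (h :: t) else xidx (h :: t)) + 1))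
          (some (if midx (h :: t) ≤ xidx (h :: t) then xidx (h :: t) else midx (h :: t)))).foldl
          (· * ·) 1) := by
    simp only [analyze_numbers_alt, hs]
  rw [hB, analyze_numbers]
  have hmin : (PySem.List.min? (h :: t) (fun x => x)).getD 0 = mval (h :: t) := by
    rw [PySem.List.min?_id_cons]; rfl
  have hmax : (PySem.List.max? (h :: t) (fun x => x)).getD 0 = xval (h :: t) := by
    rw [PySem.List.max?_id_cons]; rfl
  simp only [hmin, hmax]
  rw [min_def, max_def]
  rfl
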